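-- pv_equiv track=rewrite | github.com/CbGames09/beetwaesserung | main_1.py | is_dst
-- ===== SOURCE A (Python) =====
-- def is_dst(year, month, day, hour):
--     """
--     Prüft ob Sommerzeit (DST) in Deutschland/EU aktiv ist
--     Sommerzeit: letzter Sonntag im März 02:00 bis letzter Sonntag im Oktober 03:00
--     """
--     # Finde letzten Sonntag im März
--     march_last_sunday = 31
--     while True:
--         # Wochentag berechnen (0=Montag, 6=Sonntag)
--         # Vereinfachte Berechnung (Zeller's Congruence)
--         if march_last_sunday <= 0:
--             break
--         m = 3  # März
--         y = year
--         d = march_last_sunday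
--         if m < 3:
--             m += 12
--             y -= 1
--         weekday = (d + ((13 * (m + 1)) // 5) + y + (y // 4) - (y // 100) + (y // 400)) % 7
--         if weekday == 0:  # Sonntag
--             break
--         march_last_sunday -= 1
--
--     # Finde letzten Sonntag im Oktober
--     october_last_sunday = 31
--     while True:
--         if october_last_sunday <= 0:
--             break
--         m = 10  # Oktober
--         y = year
--         d = october_last_sunday
--         weekday = (d + ((13 * (m + 1)) // 5) + y + (y // 4) - (y // 100) + (y // 400)) % 7
--         if weekday == 0:  # Sonntag
--             break
--         october_last_sunday -= 1
--
--     # Prüfe ob Sommerzeit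
--     if month < 3 or month > 10:
--         return False  # Winterzeit
--     elif month > 3 and month < 10:
--         return True   # Sommerzeit
--     elif month == 3:
--         # März: Sommerzeit ab letztem Sonntag 02:00
--         if day < march_last_sunday:
--             return False
--         elif day > march_last_sunday:
--             return True
--         else:  # Genau am letzten Sonntag
--             return hour >= 2
--     else:  # month == 10
--         # Oktober: Winterzeit ab letztem Sonntag 03:00
--         if day < october_last_sunday:
--             return True
--         elif day > october_last_sunday:
--             return False
--         else:  # Genau am letzten Sonntag
--             return hour < 3
-- ===== SOURCE B (Python) =====
-- def is_dst(year, month, day, hour):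
--     """
--     Prüft ob Sommerzeit (DST) in Deutschland/EU aktiv ist
--     Sommerzeit: letzter Sonntag im März 02:00 bis letzter Sonntag im Oktober 03:00
--     """
--     if month < 3 or month > 10:
--         return False
--     if 3 < month < 10:
--         return True
--
--     def last_sunday(m):
--         # weekday of the 31st by Zeller's congruence (0 = A's 'Sunday'),
--         # then step back to the last Sunday in closed form (lands in 25..31).
--         c = ((13 * (m + 1)) // 5) + year + (year // 4) - (year // 100) + (year // 400)
--         return 31 - (31 + c) % 7
--
--     if month == 3:
--         return (day, hour) >= (last_sunday(3), 2)
--     else:  # month == 10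
--         return (day, hour) < (last_sunday(10), 3)
-- ===== Notes on version B (the rewrite author's own statement) =====
-- stated objective: simpler
-- what changed: Replace both backward-scanning while-loops with a closed-form last Sunday (31 minus the Zeller weekday of the 31st) computed only for the month that needs it, and express the boundary-day tests as tuple comparisons.
import Mathlib
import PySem

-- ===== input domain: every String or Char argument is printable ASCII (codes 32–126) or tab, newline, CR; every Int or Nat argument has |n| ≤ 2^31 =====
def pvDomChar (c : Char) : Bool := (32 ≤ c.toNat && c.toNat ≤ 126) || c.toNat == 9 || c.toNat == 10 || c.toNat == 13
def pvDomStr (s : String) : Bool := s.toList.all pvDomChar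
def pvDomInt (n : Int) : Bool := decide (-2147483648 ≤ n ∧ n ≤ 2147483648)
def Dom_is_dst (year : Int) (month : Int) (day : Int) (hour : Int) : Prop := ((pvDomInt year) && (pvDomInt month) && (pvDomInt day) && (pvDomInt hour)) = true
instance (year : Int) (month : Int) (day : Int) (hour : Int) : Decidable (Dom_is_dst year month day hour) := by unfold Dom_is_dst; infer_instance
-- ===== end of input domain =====

-- B replaces A's two backward-scanning while-loops by a closed-form last Sunday
-- (31 - Zeller weekday of the 31st), computed lazily; objective: simpler.


-- ===== PORT A =====
-- Zeller term shared by both of A's loops (A recomputes it each iteration with the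
-- same y, m; the dead 'if m < 3' branch of the March loop is kept literally).
def zellerC (y : Int) (m : Int) : Int :=
  PySem.Int.floordiv (13 * (m + 1)) 5 + y + PySem.Int.floordiv y 4
    - PySem.Int.floordiv y 100 + PySem.Int.floordiv y 400

-- A's while-loop: decrement d until d ≤ 0 or the weekday of d is 0 ("Sunday").
def sundayLoop (year : Int) (m : Int) (d : Int) : Int :=
  if h : d ≤ 0 then d
  else
    let weekday := PySem.Int.mod (d + zellerC year m) 7
    if weekday = 0 then d else sundayLoop year m (d - 1)
termination_by d.toNat
decreasing_by omega

def is_dst (year : Int) (month : Int) (day : Int) (hour : Int) : Bool :=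
  -- March loop: the 'if m < 3' adjustment is dead (m = 3), as in A
  let marchM : Int := if (3 : Int) < 3 then 3 + 12 else 3
  let march_last_sunday := sundayLoop (if (3 : Int) < 3 then year - 1 else year) marchM 31
  let october_last_sunday := sundayLoop year 10 31
  if month < 3 || month > 10 then false
  else if month > 3 && month < 10 then true
  else if month = 3 then
    if day < march_last_sunday then false
    else if day > march_last_sunday then true
    else hour ≥ 2
  else
    if day < october_last_sunday then true
    else if day > october_last_sunday then false
    else hour < 3

-- ===== PORT B =====
-- closed-form last Sunday of month m (Source B's last_sunday)
def lastSundayB (year : Int) (m : Int) : Int :=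
  let c := PySem.Int.floordiv (13 * (m + 1)) 5 + year + PySem.Int.floordiv year 4
    - PySem.Int.floordiv year 100 + PySem.Int.floordiv year 400
  31 - PySem.Int.mod (31 + c) 7

def is_dst_alt (year : Int) (month : Int) (day : Int) (hour : Int) : Bool :=
  if month < 3 || month > 10 then false
  else if 3 < month && month < 10 then true
  else if month = 3 then
    -- Python tuple comparison (day, hour) >= (ls, 2), lexicographic
    let ls := lastSundayB year 3
    day > ls || (day = ls && hour ≥ 2)
  else
    -- (day, hour) < (ls, 3)
    let ls := lastSundayB year 10
    day < ls || (day = ls && hour < 3)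

-- ===== PRECONDITION & SPEC =====
def Spec_is_dst (year : Int) (month : Int) (day : Int) (hour : Int) (out : Bool) : Prop := out = is_dst_alt year month day hour
instance (year : Int) (month : Int) (day : Int) (hour : Int) (out : Bool) : Decidable (Spec_is_dst year month day hour out) := by unfold Spec_is_dst; infer_instance

-- ===== CLAIM (what is proved, stated in full; the proofs are below) =====
def Claim_equal_is_dst : Prop := ∀ (year : Int) (month : Int) (day : Int) (hour : Int), Dom_is_dst year month day hour → Spec_is_dst year month day hour (is_dst year month day hour)

-- ===== LEMMAS AND PROOFS =====

-- A's loop from d returns d - ((d + c) % 7) whenever that value is positive.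
theorem sundayLoop_closed (year m : Int) (r : Nat) :
    ∀ d : Int, PySem.Int.mod (d + zellerC year m) 7 = (r : Int) → (r : Int) < d →
      sundayLoop year m d = d - r := by
  induction r with
  | zero =>
    intro d hmod hlt
    rw [sundayLoop]
    simp only [Nat.cast_zero] at hmod hlt
    rw [dif_neg (by omega)]
    simp only []
    rw [if_pos hmod]
    simp
  | succ r ih =>
    intro d hmod hlt
    have h7 : (0:Int) < 7 := by norm_num
    rw [PySem.Int.mod_eq_emod_of_pos h7] at hmod
    have hmod' : PySem.Int.mod (d - 1 + zellerC year m) 7 = (r : Int) := by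
      rw [PySem.Int.mod_eq_emod_of_pos h7]
      have h1 : (d + zellerC year m) % 7 = (r : Int) + 1 := by push_cast at hmod ⊢; omega
      have h2 : d - 1 + zellerC year m = (d + zellerC year m) - 1 := by ring
      rw [h2]
      omega
    rw [sundayLoop]
    rw [dif_neg (by push_cast at hlt; omega)]
    simp only []
    rw [if_neg (by rw [PySem.Int.mod_eq_emod_of_pos h7]; push_cast at hmod ⊢; omega)]
    have := ih (d - 1) hmod' (by push_cast at hlt ⊢; omega)
    rw [this]; push_cast; ring

-- From 31, A's loop lands exactly on B's closed form.
theorem sundayLoop_31 (year m : Int) :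
    sundayLoop year m 31 = 31 - PySem.Int.mod (31 + zellerC year m) 7 := by
  have h7 : (0:Int) < 7 := by norm_num
  have hnn : 0 ≤ PySem.Int.mod (31 + zellerC year m) 7 := PySem.Int.mod_nonneg _ h7
  have hlt7 : PySem.Int.mod (31 + zellerC year m) 7 < 7 := PySem.Int.mod_lt _ h7
  obtain ⟨r, hr⟩ : ∃ r : Nat, PySem.Int.mod (31 + zellerC year m) 7 = (r : Int) :=
    ⟨(PySem.Int.mod (31 + zellerC year m) 7).toNat, by omega⟩
  rw [hr]
  exact sundayLoop_closed year m r 31 hr (by omega)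

-- ===== VERDICT (by name: the statement is the Claim_ definition above) =====
theorem is_dst_spec : Claim_equal_is_dst := by
  intro year month day hour _
  unfold Spec_is_dst is_dst is_dst_alt
  simp only [sundayLoop_31]
  have hm : zellerC (if (3:Int) < 3 then year - 1 else year) (if (3:Int) < 3 then 3 + 12 else 3)
      = zellerC year 3 := by norm_num
  have hmarch : lastSundayB year 3 = 31 - PySem.Int.mod (31 + zellerC year 3) 7 := rfl
  have hoct : lastSundayB year 10 = 31 - PySem.Int.mod (31 + zellerC year 10) 7 := rfl
  simp only [if_neg (by norm_num : ¬ (3:Int) < 3)] at *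
  rw [← hmarch, ← hoct]
  by_cases h1 : month < 3 || month > 10
  · simp [h1]
  · simp only [h1, if_false, Bool.false_eq_true]
    by_cases h2 : month > 3 && month < 10
    · simp [h2]
    · have h2' : ¬ (3 < month && month < 10) = true := h2
      simp only [h2', if_false, Bool.false_eq_true]
      by_cases h3 : month = 3
      · simp only [h3]
        rcases lt_trichotomy day (lastSundayB year 3) with h | h | h
        · simp [h] <;> omega
        · simp [h]
        · simp [h] <;> omega
      · simp only [if_neg h3]
        rcases lt_trichotomy day (lastSundayB year 10) with h | h | h
        · simp [h]
        · simp [h]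
        · simp [h] <;> omega
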